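-- pv_equiv track=rewrite | github.com/soniapop93/AdventCalendar_2021 | Day 8/exercise_1.py | generate_output_values
-- ===== SOURCE A (Python) =====
-- def generate_output_values(input_list):
--     count = 0
--
--     for input in input_list:
--         splited_input = input.split(" ")
--         for item in splited_input:
--             if len(item) in [2, 4, 3, 7]:
--                 count += 1
--     return count
-- ===== SOURCE B (Python) =====
-- def generate_output_values(input_list):
--     # Character-level run-length scan: no split(), no token list.
--     # A run of consecutive non-space characters is exactly one split(" ") token,
--     # so counting runs whose length is 2, 3, 4 or 7 gives the same count.
--     total = 0
--     for line in input_list: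
--         run = 0
--         for ch in line:
--             if ch == " ":
--                 if run in (2, 3, 4, 7):
--                     total += 1
--                 run = 0
--             else:
--                 run += 1
--         if run in (2, 3, 4, 7):
--             total += 1
--     return total
-- ===== Notes on version B (the rewrite author's own statement) =====
-- stated objective: alternative
-- what changed: B never calls split and builds no token list: it scans each line character by character with a run-length state machine, counting a token whenever a run of non-space characters of length 2, 3, 4 or 7 ends at a space or at end of line.
import Mathlib
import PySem

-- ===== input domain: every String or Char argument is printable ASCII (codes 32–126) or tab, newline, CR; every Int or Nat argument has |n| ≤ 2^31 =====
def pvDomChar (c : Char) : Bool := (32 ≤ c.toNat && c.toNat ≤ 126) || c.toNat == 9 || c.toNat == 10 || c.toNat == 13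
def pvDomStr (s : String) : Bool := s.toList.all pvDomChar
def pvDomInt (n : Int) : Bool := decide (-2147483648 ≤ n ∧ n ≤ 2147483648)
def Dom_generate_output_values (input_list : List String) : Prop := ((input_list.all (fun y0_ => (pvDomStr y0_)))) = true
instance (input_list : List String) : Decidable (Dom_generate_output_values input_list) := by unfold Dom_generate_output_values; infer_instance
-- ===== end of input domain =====

-- B replaces split()-and-test by a character-level run-length state machine over each
-- line (a run of non-space chars is one token); same return value, same O(chars) cost.

-- ===== PORT A =====
-- s.split(" "): sep is the non-empty literal " ", so split? is always 'some'; the default [] is never used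
def pvSplitSp (s : String) : List String := (PySem.Str.split? s " ").getD []

def generate_output_values (input_list : List String) : Int :=
  input_list.foldl (fun count input =>
    (pvSplitSp input).foldl (fun c item =>
      if PySem.Str.len item ∈ ([2, 4, 3, 7] : List Int) then c + 1 else c) count) 0

-- ===== PORT B =====
-- inner Python loop body: on ' ' close the current run (counting it if its length is
-- 2/3/4/7) and reset, otherwise extend the run
def govStep (st : Int × Int) (c : Char) : Int × Int :=
  if c = ' ' then
    (if st.2 ∈ ([2, 3, 4, 7] : List Int) then st.1 + 1 else st.1, 0)
  else (st.1, st.2 + 1)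

-- the trailing 'if run in (2,3,4,7): total += 1' after a line's loop
def govFin (st : Int × Int) : Int :=
  if st.2 ∈ ([2, 3, 4, 7] : List Int) then st.1 + 1 else st.1

def generate_output_values_alt (input_list : List String) : Int :=
  input_list.foldl (fun total line => govFin (line.toList.foldl govStep (total, 0))) 0

-- ===== PRECONDITION & SPEC =====
def Spec_generate_output_values (input_list : List String) (out : Int) : Prop := out = generate_output_values_alt input_list
instance (input_list : List String) (out : Int) : Decidable (Spec_generate_output_values input_list out) := by unfold Spec_generate_output_values; infer_instance

-- ===== CLAIM (what is proved, stated in full; the proofs are below) =====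
def Claim_equal_generate_output_values : Prop := ∀ (input_list : List String), Dom_generate_output_values input_list → Spec_generate_output_values input_list (generate_output_values input_list)

-- ===== LEMMAS AND PROOFS =====

-- reference splitter: split a char list on single spaces, 'pre' the token built so far
def mySplit (pre : List Char) : List Char → List (List Char)
  | [] => [pre]
  | c :: rest => if c = ' ' then pre :: mySplit [] rest else mySplit (pre ++ [c]) rest

-- PySem's fuelled splitter with sep = [' '] computes mySplit
theorem gov_go_spec (fuel : Nat) :
    ∀ (l cur : List Char) (acc : List (List Char)), l.length < fuel →
    PySem.Chars.splitOn.go [' '] fuel l cur acc = acc.reverse ++ mySplit cur.reverse l := by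
  induction fuel with
  | zero => intro l cur acc h; omega
  | succ fuel ih =>
      intro l cur acc h
      cases l with
      | nil => rw [PySem.Chars.splitOn.go.eq_def]; simp [mySplit]
      | cons c rest =>
          rw [PySem.Chars.splitOn.go.eq_def]
          by_cases hc : c = ' '
          · subst hc
            simp only [List.isPrefixOf, beq_self_eq_true, Bool.true_and, if_pos, List.length_cons, List.length_nil,
              List.drop_succ_cons, List.drop_zero]
            rw [ih rest [] (cur.reverse :: acc) (by simp at h ⊢; omega)]
            simp [mySplit]
          · have hp : ([' '].isPrefixOf (c :: rest)) = false := by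
              simp [List.isPrefixOf]
              exact fun hh => hc hh.symm
            simp only [hp, Bool.false_eq_true, if_false]
            rw [ih rest (c :: cur) acc (by simp at h ⊢; omega)]
            simp [mySplit, hc]

theorem gov_splitOn_space (s : List Char) :
    PySem.Chars.splitOn s [' '] = mySplit [] s := by
  unfold PySem.Chars.splitOn
  rw [gov_go_spec (s.length + 1) s [] [] (by omega)]
  simp

-- A's split-token list for a line is mySplit of its characters
theorem gov_pvSplitSp (s : String) :
    pvSplitSp s = (mySplit [] s.toList).map String.ofList := by
  unfold pvSplitSp PySem.Str.split? PySem.Chars.split?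
  simp [gov_splitOn_space]

-- the two membership orders agree
theorem gov_mem_iff (n : Int) :
    (n ∈ ([2, 3, 4, 7] : List Int)) ↔ (n ∈ ([2, 4, 3, 7] : List Int)) := by
  simp; tauto

-- B's per-line scan counts, among mySplit's tokens, those with length in the set
theorem gov_scan_eq (l : List Char) :
    ∀ (pre : List Char) (total : Int),
    govFin (l.foldl govStep (total, (pre.length : Int)))
    = total + ((mySplit pre l).countP
        (fun cs => decide ((cs.length : Int) ∈ ([2, 4, 3, 7] : List Int))) : Int) := by
  induction l with
  | nil =>
      intro pre total
      simp only [List.foldl_nil, mySplit, List.countP_cons, List.countP_nil, govFin]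
      by_cases h : ((pre.length : Int) ∈ ([2, 3, 4, 7] : List Int))
      · have h' := (gov_mem_iff _).mp h
        simp [h, h']
      · have h' : ¬ ((pre.length : Int) ∈ ([2, 4, 3, 7] : List Int)) :=
          fun hh => h ((gov_mem_iff _).mpr hh)
        simp [h, h']
  | cons c rest ih =>
      intro pre total
      by_cases hc : c = ' '
      · subst hc
        have e : govStep (total, (pre.length : Int)) ' '
            = (if (pre.length : Int) ∈ ([2, 3, 4, 7] : List Int) then total + 1 else total, 0) := by
          simp [govStep]
        rw [List.foldl_cons, e]
        by_cases h : ((pre.length : Int) ∈ ([2, 3, 4, 7] : List Int))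
        · rw [if_pos h]
          have h2 := ih [] (total + 1)
          simp only [List.length_nil, Nat.cast_zero] at h2
          have h' := (gov_mem_iff _).mp h
          rw [h2, show mySplit pre (' ' :: rest) = pre :: mySplit [] rest from by
              simp [mySplit], List.countP_cons]
          simp only [decide_eq_true h']
          push_cast
          ring
        · rw [if_neg h]
          have h2 := ih [] total
          simp only [List.length_nil, Nat.cast_zero] at h2
          have h' : ¬ ((pre.length : Int) ∈ ([2, 4, 3, 7] : List Int)) :=
            fun hh => h ((gov_mem_iff _).mpr hh)
          rw [h2, show mySplit pre (' ' :: rest) = pre :: mySplit [] rest from by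
              simp [mySplit], List.countP_cons]
          simp only [decide_eq_false h']
          push_cast
          ring
      · have e : govStep (total, (pre.length : Int)) c = (total, (pre.length : Int) + 1) := by
          simp [govStep, hc]
        rw [List.foldl_cons, e]
        have h2 := ih (pre ++ [c]) total
        simp only [List.length_append, List.length_cons, List.length_nil, Nat.cast_add,
          Nat.cast_one, zero_add] at h2
        rw [h2, show mySplit pre (c :: rest) = mySplit (pre ++ [c]) rest from by
            simp [mySplit, hc]]

-- per-line: A's inner token loop equals B's character scan
theorem gov_line_eq (acc : Int) (line : String) :
    (pvSplitSp line).foldl (fun c item =>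
      if PySem.Str.len item ∈ ([2, 4, 3, 7] : List Int) then c + 1 else c) acc
    = govFin (line.toList.foldl govStep (acc, 0)) := by
  rw [gov_pvSplitSp,
    PySem.List.foldl_ite_add_one (fun item => PySem.Str.len item ∈ ([2, 4, 3, 7] : List Int))]
  have h2 := gov_scan_eq line.toList [] acc
  simp only [List.length_nil, Nat.cast_zero] at h2
  rw [h2, List.countP_map]
  have hcp : List.countP
      ((fun item => decide (PySem.Str.len item ∈ ([2, 4, 3, 7] : List Int))) ∘ String.ofList)
      (mySplit [] line.toList)
      = List.countP (fun cs => decide ((cs.length : Int) ∈ ([2, 4, 3, 7] : List Int)))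
        (mySplit [] line.toList) := by
    apply List.countP_congr
    intro cs _
    simp [PySem.Str.len, Function.comp]
  rw [hcp]

-- ===== VERDICT (by name: the statement is the Claim_ definition above) =====
theorem generate_output_values_spec : Claim_equal_generate_output_values := by
  intro input_list _
  unfold Spec_generate_output_values generate_output_values generate_output_values_alt
  apply PySem.List.foldl_congr_mem
  intro acc line _
  exact gov_line_eq acc line
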